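-- pv_equiv track=rewrite | github.com/sayymeoww/TaskFor100 | hard.py | solve
-- ===== SOURCE A (Python) =====
-- def solve(n : int, k : int) -> int:
--     arr = []
--     while n:
--         arr.append(n % k)
--         n //= k
--     arr.append(0)
--
--     m = len(arr)
--     for i in range(m - 1, -1, -1):
--         if arr[i] > 1:
--             for j in range(i + 1, m):
--                 if arr[j] == 0:
--                     arr[j] = 1
--                     for l in range(0, j):
--                         arr[l] = 0
--                     break
--             break
--
--     ans = 0
--     for index, bit in enumerate(arr):
--         if bit == 1:
--             ans += index
--
--     return ans
-- ===== SOURCE B (Python) =====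
-- def solve(n: int, k: int) -> int:
--     d = []
--     while n:
--         d.append(n % k)
--         n //= k
--     d.append(0)
--
--     ans = 0
--     dirty = False
--     for idx, v in enumerate(d):
--         if v > 1:
--             ans, dirty = 0, True
--         elif v == 0:
--             if dirty:
--                 ans, dirty = idx, False
--         elif v == 1:
--             if not dirty:
--                 ans += idx
--     return ans
-- ===== Notes on version B (the rewrite author's own statement) =====
-- stated objective: simpler
-- what changed: A scans the digit array top-down for the highest digit >1, then scans upward for a zero, mutates the array in place (set the zero to 1, zero everything below) and finally re-sums the whole array; B replaces all of that with a single left-to-right pass over the digits carrying an accumulator and a 'dirty' flag (a digit >1 resets the accumulator, the first zero after it absorbs the carry as its index), with no mutation and no rescans.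
import Mathlib
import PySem

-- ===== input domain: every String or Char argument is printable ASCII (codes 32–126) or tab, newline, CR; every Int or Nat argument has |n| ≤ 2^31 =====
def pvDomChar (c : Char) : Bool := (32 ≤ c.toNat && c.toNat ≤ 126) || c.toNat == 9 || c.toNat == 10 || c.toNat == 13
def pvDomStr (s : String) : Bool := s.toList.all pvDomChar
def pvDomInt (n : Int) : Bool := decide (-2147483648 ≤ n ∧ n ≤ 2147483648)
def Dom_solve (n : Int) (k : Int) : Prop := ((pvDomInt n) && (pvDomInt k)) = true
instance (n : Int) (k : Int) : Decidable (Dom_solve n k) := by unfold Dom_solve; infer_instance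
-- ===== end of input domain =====

-- B replaces A's find-highest-digit / find-first-zero / mutate-array / full-resum strategy by a
-- single left-to-right pass over the digit list with an accumulator and a flag (objective: simpler).

-- ===== PORT A =====
-- shared digit loop: 'while n: arr.append(n % k); n //= k' (the fuel argument only makes the
-- loop total; n.natAbs + 2 steps suffice on every input Pre_solve admits)
def pyDigits : Nat → Int → Int → List Int
  | 0, _, _ => []
  | f+1, n, k => if n = 0 then [] else PySem.Int.mod n k :: pyDigits f (PySem.Int.floordiv n k) k

-- 'for i in range(m-1,-1,-1): if arr[i] > 1: … break' — downward scan, `some i` = break at i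
def aFindI (arr : List Int) : Nat → Option Nat
  | 0 => none
  | i+1 => if 1 < arr.getD i 0 then some i else aFindI arr i

-- 'for j in range(i+1, m): if arr[j]==0: arr[j]=1; for l in range(0,j): arr[l]=0; break'
def aFindJ (arr : List Int) (j : Nat) : List Int :=
  if _h : j < arr.length then
    if arr.getD j 0 = 0 then
      (List.range j).foldl (fun a l => a.set l 0) (arr.set j 1)
    else aFindJ arr (j+1)
  else arr
termination_by arr.length - j

-- body of 'for index, bit in enumerate(arr): if bit == 1: ans += index'
def astep (ans : Int) (p : Int × Int) : Int := if p.2 = 1 then ans + p.1 else ans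

def solve (n : Int) (k : Int) : Int :=
  let arr := pyDigits (n.natAbs + 2) n k ++ [0]
  let arr2 := match aFindI arr arr.length with
    | some i => aFindJ arr (i+1)
    | none => arr
  (PySem.List.enumerate arr2 0).foldl astep 0

-- ===== PORT B =====
-- loop body of B's single pass, state = (ans, dirty)
def bstep (s : Int × Bool) (p : Int × Int) : Int × Bool :=
  if 1 < p.2 then (0, true)
  else if p.2 = 0 then (if s.2 then (p.1, false) else s)
  else if p.2 = 1 then (if s.2 then s else (s.1 + p.1, s.2))
  else s

def solve_alt (n : Int) (k : Int) : Int :=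
  let d := pyDigits (n.natAbs + 2) n k ++ [0]
  ((PySem.List.enumerate d 0).foldl bstep ((0 : Int), false)).1

-- ===== PRECONDITION & SPEC =====
-- Pre_solve excludes exactly the inputs on which A never returns: for k = 0 and n ≠ 0 the first
-- 'n % k' raises ZeroDivisionError, and for n ≠ 0 with k ∈ {-1, 1}, or n < 0 with k ≥ 2, the
-- while loop never terminates.  On every other input A returns normally.
def Pre_solve (n : Int) (k : Int) : Prop := (2 ≤ k ∧ 0 ≤ n) ∨ k ≤ -2 ∨ n = 0
instance (n : Int) (k : Int) : Decidable (Pre_solve n k) := by unfold Pre_solve; infer_instance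
def pvWitness_solve : Int × Int := (5, 2)

def Spec_solve (n : Int) (k : Int) (out : Int) : Prop := out = solve_alt n k
instance (n : Int) (k : Int) (out : Int) : Decidable (Spec_solve n k out) := by unfold Spec_solve; infer_instance

-- ===== CLAIM (what is proved, stated in full; the proofs are below) =====
def Claim_equal_solve : Prop := ∀ (n : Int) (k : Int), Dom_solve n k → Pre_solve n k → Spec_solve n k (solve n k)

-- ===== LEMMAS AND PROOFS =====

-- digits of a base-k expansion, k > 0: nonnegative
lemma digits_nonneg (k : Int) (hk : 0 < k) : ∀ (f : Nat) (n : Int), ∀ x ∈ pyDigits f n k, 0 ≤ x := by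
  intro f
  induction f with
  | zero => simp [pyDigits]
  | succ f ih =>
    intro n x hx
    rw [pyDigits] at hx
    split at hx
    · simp at hx
    · rcases List.mem_cons.mp hx with h | h
      · exact h ▸ PySem.Int.mod_nonneg _ hk
      · exact ih _ x h

-- digits for k < 0: nonpositive (hence never > 1)
lemma digits_nonpos (k : Int) (hk : k < 0) : ∀ (f : Nat) (n : Int), ∀ x ∈ pyDigits f n k, x ≤ 0 := by
  intro f
  induction f with
  | zero => simp [pyDigits]
  | succ f ih =>
    intro n x hx
    rw [pyDigits] at hx
    split at hx
    · simp at hx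
    · rcases List.mem_cons.mp hx with h | h
      · exact h ▸ (PySem.Int.mod_neg_bounds _ hk).2
      · exact ih _ x h

lemma findI_none (arr : List Int) (h : ∀ x ∈ arr, x ≤ 1) : ∀ t, aFindI arr t = none := by
  intro t
  induction t with
  | zero => rfl
  | succ i ih =>
    have hnot : ¬ 1 < arr.getD i 0 := by
      rw [List.getD_eq_getElem?_getD]
      cases hg : arr[i]? with
      | none => simp
      | some x => simpa using h x (List.mem_of_getElem? hg)
    rw [aFindI, if_neg hnot]
    exact ih

lemma findI_some (p : List Int) (a : Int) (R : List Int) (ha : 1 < a) (hR : ∀ x ∈ R, x ≤ 1) :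
    ∀ t, p.length < t → t ≤ p.length + 1 + R.length → aFindI (p ++ a :: R) t = some p.length := by
  intro t
  induction t with
  | zero => omega
  | succ i ih =>
    intro h1 h2
    rw [aFindI]
    rcases Nat.eq_or_lt_of_le (Nat.lt_succ_iff.mp h1) with he | hlt
    · subst he
      have hA : (p ++ a :: R).getD p.length 0 = a := by
        simp [List.getD_eq_getElem?_getD]
      rw [hA, if_pos ha]
    · have hx : ∃ x ∈ R, (p ++ a :: R).getD i 0 = x := by
        obtain ⟨t', ht'⟩ : ∃ t', i - p.length = t' + 1 := ⟨i - p.length - 1, by omega⟩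
        refine ⟨R[t']'(by omega), List.getElem_mem _, ?_⟩
        rw [List.getD_eq_getElem?_getD, List.getElem?_append_right (by omega), ht']
        simp [List.getElem?_eq_getElem (show t' < R.length by omega)]
      obtain ⟨x, hmem, hev⟩ := hx
      rw [hev, if_neg (by have := hR x hmem; omega)]
      exact ih hlt (by omega)

lemma zero_fold (t : Nat) : ∀ xs : List Int, t ≤ xs.length →
    (List.range t).foldl (fun a l => a.set l 0) xs = List.replicate t 0 ++ xs.drop t := by
  induction t with
  | zero => simp
  | succ t ih =>
    intro xs hle
    rw [List.range_succ, List.foldl_append, ih xs (by omega)]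
    simp only [List.foldl_cons, List.foldl_nil]
    have hb : (List.replicate t (0:Int) ++ xs.drop t).set t 0
        = List.replicate t (0:Int) ++ (xs.drop t).set 0 0 := by
      have := List.set_append (i := t) (s := List.replicate t (0:Int)) (t := xs.drop t) (x := (0:Int))
      simpa using this
    rw [hb, List.drop_eq_getElem_cons (show t < xs.length by omega), List.set_cons_zero,
      List.replicate_succ']
    simp

lemma findJ_eq (P q2 : List Int) :
    ∀ j₀, j₀ ≤ P.length → (∀ u, j₀ ≤ u → (hu : u < P.length) → P[u] ≠ 0) →
    aFindJ (P ++ 0 :: q2) j₀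
      = (List.range P.length).foldl (fun a l => a.set l 0) ((P ++ 0 :: q2).set P.length 1) := by
  intro j₀
  induction hd : P.length - j₀ generalizing j₀ with
  | zero =>
    intro hle _
    have hj : j₀ = P.length := by omega
    subst hj
    rw [aFindJ, dif_pos (by simp)]
    rw [if_pos (by simp [List.getD_eq_getElem?_getD])]
  | succ d ih =>
    intro hle hne
    have hjlt : j₀ < P.length := by omega
    rw [aFindJ, dif_pos (by simp; omega), if_neg, ih (j₀+1) (by omega) (by omega)
      (fun u hu h2 => hne u (by omega) h2)]
    rw [List.getD_eq_getElem?_getD, List.getElem?_append_left hjlt,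
      List.getElem?_eq_getElem hjlt]
    simpa using hne j₀ le_rfl hjlt

lemma first_zero : ∀ r : List Int, (0:Int) ∈ r →
    ∃ q1 q2, r = q1 ++ 0 :: q2 ∧ ∀ x ∈ q1, x ≠ 0 := by
  intro r
  induction r with
  | nil => simp
  | cons y rest ih =>
    intro h
    rcases eq_or_ne y 0 with rfl | hy
    · exact ⟨[], rest, rfl, by simp⟩
    · have h' : (0:Int) ∈ rest := by
        rcases List.mem_cons.mp h with h | h
        · exact absurd h.symm hy
        · exact h
      obtain ⟨q1, q2, hr, hq1⟩ := ih h'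
      refine ⟨y :: q1, q2, by simp [hr], ?_⟩
      intro x hx
      rcases List.mem_cons.mp hx with rfl | hx
      · exact hy
      · exact hq1 x hx


lemma b_clean : ∀ (xs : List Int) (s a : Int), (∀ x ∈ xs, x ≤ 1) →
    (PySem.List.enumerate xs s).foldl bstep (a, false)
      = ((PySem.List.enumerate xs s).foldl astep a, false) := by
  intro xs
  induction xs with
  | nil => simp
  | cons x xs ih =>
    intro s a h
    have hx : x ≤ 1 := h x (by simp)
    rw [PySem.List.enumerate_cons]
    simp only [List.foldl_cons]
    have hstep : bstep (a, false) (s, x) = (astep a (s, x), false) := by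
      rcases eq_or_ne x 0 with h0 | h0
      · simp [bstep, astep, h0]
      · rcases eq_or_ne x 1 with h1 | h1
        · simp [bstep, astep, h1]
        · simp [bstep, astep, h0, h1, if_neg (by omega : ¬ 1 < x)]
    rw [hstep, ih (s+1) _ (fun y hy => h y (by simp [hy]))]

lemma b_ones : ∀ (xs : List Int) (s c : Int), (∀ x ∈ xs, x = 1) →
    (PySem.List.enumerate xs s).foldl bstep (c, true) = (c, true) := by
  intro xs
  induction xs with
  | nil => simp
  | cons x xs ih =>
    intro s c h
    rw [PySem.List.enumerate_cons]
    simp only [List.foldl_cons]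
    rw [show bstep (c, true) (s, x) = (c, true) by simp [bstep, h x (by simp)],
      ih (s+1) c (fun y hy => h y (by simp [hy]))]

lemma a_zeros : ∀ (t : Nat) (s a : Int),
    (PySem.List.enumerate (List.replicate t (0:Int)) s).foldl astep a = a := by
  intro t
  induction t with
  | zero => simp
  | succ t ih =>
    intro s a
    rw [List.replicate_succ, PySem.List.enumerate_cons]
    simp only [List.foldl_cons]
    rw [show astep a (s, 0) = a by simp [astep], ih]

lemma bfold_single (x : Int) (s : Int) (st : Int × Bool) :
    (PySem.List.enumerate [x] s).foldl bstep st = bstep st (s, x) := by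
  simp [PySem.List.enumerate_cons]

lemma afold_single (x : Int) (s : Int) (a : Int) :
    (PySem.List.enumerate [x] s).foldl astep a = astep a (s, x) := by
  simp [PySem.List.enumerate_cons]

lemma last_big : ∀ ds : List Int, (∃ x ∈ ds, 1 < x) →
    ∃ p a q, ds = p ++ a :: q ∧ 1 < a ∧ ∀ x ∈ q, x ≤ 1 := by
  intro ds
  induction ds with
  | nil => simp
  | cons y rest ih =>
    intro h
    by_cases hex : ∃ x ∈ rest, 1 < x
    · obtain ⟨p, a, q, hds, ha, hq⟩ := ih hex
      exact ⟨y :: p, a, q, by simp [hds], ha, hq⟩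
    · push_neg at hex
      have hy : 1 < y := by
        obtain ⟨x, hx, h1⟩ := h
        rcases List.mem_cons.mp hx with rfl | hx
        · exact h1
        · exact absurd h1 (by have := hex x hx; omega)
      exact ⟨[], y, rest, rfl, hy, fun x hx => by have := hex x hx; omega⟩

lemma main_neg (arr : List Int) (h : ∀ x ∈ arr, x ≤ 1) :
    (PySem.List.enumerate (match aFindI arr arr.length with
      | some i => aFindJ arr (i+1)
      | none => arr) 0).foldl astep 0
      = ((PySem.List.enumerate arr 0).foldl bstep ((0 : Int), false)).1 := by
  rw [findI_none arr h, b_clean arr 0 0 h]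

lemma main_pos (ds : List Int) (h0 : ∀ x ∈ ds, 0 ≤ x) :
    (PySem.List.enumerate (match aFindI (ds ++ [0]) (ds ++ [0]).length with
      | some i => aFindJ (ds ++ [0]) (i+1)
      | none => ds ++ [0]) 0).foldl astep 0
      = ((PySem.List.enumerate (ds ++ [0]) 0).foldl bstep ((0 : Int), false)).1 := by
  by_cases hex : ∃ x ∈ ds, 1 < x
  · obtain ⟨p, a, q, hds, ha, hq⟩ := last_big ds hex
    obtain ⟨q1, q2, hr, hq1ne⟩ := first_zero (q ++ [0]) (by simp)
    have hq1mem : ∀ x ∈ q1, x = 1 := by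
      intro x hx
      have hxr : x ∈ q ++ [0] := hr ▸ List.mem_append_left _ hx
      have hxne := hq1ne x hx
      rcases List.mem_append.mp hxr with hxq | hx0
      · have := hq x hxq
        have := h0 x (hds ▸ List.mem_append_right _ (List.mem_cons_of_mem _ hxq))
        omega
      · simp at hx0; omega
    have hq2le : ∀ x ∈ q2, x ≤ 1 := by
      intro x hx
      have hxr : x ∈ q ++ [0] := hr ▸ List.mem_append_right _ (List.mem_cons_of_mem _ hx)
      rcases List.mem_append.mp hxr with hxq | hx0
      · exact hq x hxq
      · simp at hx0; omega
    have harr : ds ++ [0] = (p ++ a :: q1) ++ 0 :: q2 := by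
      rw [hds]; simp [hr]
    have hfind : aFindI (ds ++ [0]) (ds ++ [0]).length = some p.length := by
      have hR : ∀ x ∈ q1 ++ 0 :: q2, x ≤ 1 := by
        intro x hx
        rcases List.mem_append.mp hx with h1 | h2
        · have := hq1mem x h1; omega
        · rcases List.mem_cons.mp h2 with rfl | h2
          · omega
          · exact hq2le x h2
      have harr2 : ds ++ [0] = p ++ a :: (q1 ++ 0 :: q2) := by rw [harr]; simp
      rw [harr2]
      refine findI_some p a (q1 ++ 0 :: q2) ha hR _ (by simp) (by simp; omega)
    have hmut : aFindJ (ds ++ [0]) (p.length + 1)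
        = List.replicate (p ++ a :: q1).length 0 ++ 1 :: q2 := by
      rw [harr, findJ_eq (p ++ a :: q1) q2 (p.length + 1) (by simp) ?_]
      · have hset : ((p ++ a :: q1) ++ 0 :: q2).set (p ++ a :: q1).length 1
            = (p ++ a :: q1) ++ 1 :: q2 := by
          have := List.set_append (i := (p ++ a :: q1).length)
            (s := p ++ a :: q1) (t := (0:Int) :: q2) (x := (1:Int))
          simpa using this
        rw [hset, zero_fold (p ++ a :: q1).length ((p ++ a :: q1) ++ 1 :: q2) (by simp)]
        congr 1
        exact List.drop_left
      · intro u hu hult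
        have hur : (p ++ a :: q1)[u] = (a :: q1)[u - p.length]'(by simp at hult ⊢; omega) :=
          List.getElem_append_right (by omega)
        rw [hur, List.getElem_cons]
        split
        · omega
        · have : q1[u - p.length - 1]'(by simp at hult; omega) ∈ q1 := List.getElem_mem _
          have := hq1mem _ this
          omega
    rw [hfind]
    simp only []
    rw [hmut]
    have hrepl : List.replicate (p ++ a :: q1).length (0:Int) ++ 1 :: q2
        = List.replicate (p ++ a :: q1).length (0:Int) ++ [1] ++ q2 := by simp
    have harr3 : ds ++ [0] = p ++ [a] ++ q1 ++ [0] ++ q2 := by rw [harr]; simp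
    rw [hrepl, harr3]
    simp only [PySem.List.enumerate_append, List.foldl_append, bfold_single, afold_single,
      a_zeros]
    rw [show ∀ st : Int × Bool, ∀ s : Int, bstep st (s, a) = (0, true) from
      fun st s => by simp [bstep, ha]]
    rw [b_ones q1 _ 0 hq1mem]
    rw [show ∀ s : Int, bstep ((0:Int), true) (s, (0:Int)) = (s, false) from
      fun s => by simp [bstep]]
    rw [b_clean q2 _ _ hq2le]
    simp only [astep]
    have e1 : ∀ i i' : Int, i = i' → ∀ c c' : Int, c = c' →
        List.foldl astep c (PySem.List.enumerate q2 i) = List.foldl astep c' (PySem.List.enumerate q2 i') := by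
      intro i i' hi c c' hc
      rw [hi, hc]
    refine e1 _ _ ?_ _ _ ?_ <;>
      · simp only [if_true, List.length_append, List.length_replicate, List.length_cons,
          List.length_nil]
        push_cast
        ring
  · push_neg at hex
    refine main_neg (ds ++ [0]) ?_
    intro x hx
    rcases List.mem_append.mp hx with h | h
    · exact hex x h
    · simp at h; omega

-- ===== VERDICT (by name: the statement is the Claim_ definition above) =====
theorem solve_spec : Claim_equal_solve := by
  intro n k _ hPre
  show solve n k = solve_alt n k
  rw [solve, solve_alt]
  rcases hPre with ⟨hk, _⟩ | hk | hn
  · exact main_pos _ (digits_nonneg k (by omega) _ n)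
  · refine main_neg _ ?_
    intro x hx
    rcases List.mem_append.mp hx with h | h
    · have := digits_nonpos k (by omega) _ n x h; omega
    · simp at h; omega
  · subst hn
    have hd : pyDigits ((0:Int).natAbs + 2) 0 k ++ [0] = [0] := rfl
    rw [hd]
    exact main_neg [0] (by intro x hx; simp at hx; omega)
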